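-- pv_equiv track=rewrite | github.com/ahmad2493/Canoja-Backend | scrapers/ontario.py | determine_license_type
-- ===== SOURCE A (Python) =====
-- def determine_license_type(premises_name: str) -> str:
--     """Determine license type based on premises name"""
--     if not premises_name:
--         return 'retail'  # Default for Ontario cannabis stores
--
--     name_lower = premises_name.lower()
--
--     # Most Ontario entries appear to be retail stores
--     # Look for specific indicators
--     if any(word in name_lower for word in ['cultivation', 'cultivator', 'grow', 'farm']):
--         return 'cultivation'
--     elif any(word in name_lower for word in ['processing', 'processor', 'extraction', 'manufacturing']):
--         return 'processing'
--     elif any(word in name_lower for word in ['distribution', 'distributor', 'transport', 'delivery']):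
--         return 'distribution'
--     elif any(word in name_lower for word in ['testing', 'lab', 'laboratory']):
--         return 'testing'
--     else:
--         # Default to retail for Ontario cannabis stores
--         return 'retail'
-- ===== SOURCE B (Python) =====
-- _KEYWORD_RANK = {
--     'cultivation': 0, 'cultivator': 0, 'grow': 0, 'farm': 0,
--     'processing': 1, 'processor': 1, 'extraction': 1, 'manufacturing': 1,
--     'distribution': 2, 'distributor': 2, 'transport': 2, 'delivery': 2,
--     'testing': 3, 'lab': 3, 'laboratory': 3,
-- }
-- _LABELS = ['cultivation', 'processing', 'distribution', 'testing', 'retail']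
--
--
-- def determine_license_type(premises_name: str) -> str:
--     """Determine license type based on premises name"""
--     if not premises_name:
--         return 'retail'
--     name = premises_name.lower()
--     best = 4  # retail
--     for i in range(len(name)):
--         for kw, rank in _KEYWORD_RANK.items():
--             if rank < best and name.startswith(kw, i):
--                 best = rank
--     return _LABELS[best]
-- ===== Notes on version B (the rewrite author's own statement) =====
-- stated objective: alternative
-- what changed: Instead of an ordered chain of whole-string substring searches per category, B makes a single left-to-right scan over the positions of the lowercased name, testing each keyword as a prefix at each position and keeping the minimum category rank seen; the label of the minimal rank is returned.
import Mathlib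
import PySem

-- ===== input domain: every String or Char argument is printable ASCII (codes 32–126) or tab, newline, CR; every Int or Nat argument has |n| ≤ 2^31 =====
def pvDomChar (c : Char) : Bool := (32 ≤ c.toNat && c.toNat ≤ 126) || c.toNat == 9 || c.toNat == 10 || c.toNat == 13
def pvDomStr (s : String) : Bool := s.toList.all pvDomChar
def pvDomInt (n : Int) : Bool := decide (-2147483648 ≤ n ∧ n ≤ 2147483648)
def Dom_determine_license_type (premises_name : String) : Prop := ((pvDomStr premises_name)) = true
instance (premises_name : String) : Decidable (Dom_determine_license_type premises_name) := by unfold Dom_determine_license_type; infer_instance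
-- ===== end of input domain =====

-- B replaces A's ordered chain of whole-string substring searches by a single position scan
-- over the lowercased name that keeps the minimum matching category rank (alternative algorithm).


-- ===== PORT A =====
def determine_license_type (premises_name : String) : String :=
  if premises_name == "" then "retail"
  else
    let name_lower := PySem.Str.lower premises_name
    if ["cultivation", "cultivator", "grow", "farm"].any (fun w => PySem.Str.isIn w name_lower) then "cultivation"
    else if ["processing", "processor", "extraction", "manufacturing"].any (fun w => PySem.Str.isIn w name_lower) then "processing"
    else if ["distribution", "distributor", "transport", "delivery"].any (fun w => PySem.Str.isIn w name_lower) then "distribution"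
    else if ["testing", "lab", "laboratory"].any (fun w => PySem.Str.isIn w name_lower) then "testing"
    else "retail"

-- ===== PORT B =====
-- _KEYWORD_RANK, in insertion order
def kwRank : List (List Char × Nat) :=
  [("cultivation".toList, 0), ("cultivator".toList, 0), ("grow".toList, 0), ("farm".toList, 0),
   ("processing".toList, 1), ("processor".toList, 1), ("extraction".toList, 1), ("manufacturing".toList, 1),
   ("distribution".toList, 2), ("distributor".toList, 2), ("transport".toList, 2), ("delivery".toList, 2),
   ("testing".toList, 3), ("lab".toList, 3), ("laboratory".toList, 3)]

def pvLabels : List String := ["cultivation", "processing", "distribution", "testing", "retail"]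

-- the inner for-loop: `for kw, rank in _KEYWORD_RANK.items(): if rank < best and name.startswith(kw, i): best = rank`
-- (name.startswith(kw, i) tested as "kw is a prefix of the current suffix")
def kwStep (t : List Char) (best : Nat) : Nat :=
  kwRank.foldl (fun b p => if p.2 < b && PySem.Chars.startswith t p.1 then p.2 else b) best

-- the outer for-loop over positions i = 0 .. len(name)-1, realised as recursion on the suffixes
def scanPos : List Char → Nat → Nat
  | [], best => best
  | c :: rest, best => scanPos rest (kwStep (c :: rest) best)

def determine_license_type_alt (premises_name : String) : String :=
  if premises_name == "" then "retail"
  else pvLabels.getD (scanPos (PySem.Str.lower premises_name).toList 4) "retail"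

-- ===== PRECONDITION & SPEC =====
def Spec_determine_license_type (premises_name : String) (out : String) : Prop := out = determine_license_type_alt premises_name
instance (premises_name : String) (out : String) : Decidable (Spec_determine_license_type premises_name out) := by unfold Spec_determine_license_type; infer_instance

-- ===== CLAIM (what is proved, stated in full; the proofs are below) =====
def Claim_equal_determine_license_type : Prop := ∀ (premises_name : String), Dom_determine_license_type premises_name → Spec_determine_license_type premises_name (determine_license_type premises_name)

-- ===== LEMMAS AND PROOFS =====

-- "some nonempty suffix of s starts with p.1": what one scanPos pass can see for pair p
def Hits (s : List Char) (p : List Char × Nat) : Prop :=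
  ∃ t, t <:+ s ∧ t ≠ [] ∧ PySem.Chars.startswith t p.1 = true

theorem kwStep_spec (t : List Char) (b : Nat) :
    kwStep t b ≤ b ∧
    (kwStep t b = b ∨ ∃ p ∈ kwRank, PySem.Chars.startswith t p.1 = true ∧ kwStep t b = p.2) ∧
    (∀ p ∈ kwRank, PySem.Chars.startswith t p.1 = true → kwStep t b ≤ p.2) := by
  unfold kwStep
  generalize kwRank = l
  induction l generalizing b with
  | nil => simp
  | cons p0 rest ih =>
    simp only [List.foldl_cons]
    rcases ih (if p0.2 < b && PySem.Chars.startswith t p0.1 then p0.2 else b) with ⟨h1, h2, h3⟩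
    by_cases hc : (decide (p0.2 < b) && PySem.Chars.startswith t p0.1) = true
    · rw [if_pos hc] at h1 h2 h3 ⊢
      obtain ⟨hlt, hst⟩ : p0.2 < b ∧ PySem.Chars.startswith t p0.1 = true := by
        simpa using hc
      refine ⟨le_trans h1 (le_of_lt hlt), ?_, ?_⟩
      · rcases h2 with h2 | ⟨p, hp, hs, he⟩
        · exact Or.inr ⟨p0, by simp, hst, h2⟩
        · exact Or.inr ⟨p, by simp [hp], hs, he⟩
      · intro p hp hs
        rcases List.mem_cons.mp hp with rfl | hp
        · exact h1
        · exact h3 p hp hs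
    · rw [if_neg hc] at h1 h2 h3 ⊢
      refine ⟨h1, ?_, ?_⟩
      · rcases h2 with h2 | ⟨p, hp, hs, he⟩
        · exact Or.inl h2
        · exact Or.inr ⟨p, by simp [hp], hs, he⟩
      · intro p hp hs
        rcases List.mem_cons.mp hp with rfl | hp
        · -- p matches but p.2 < b failed, so b ≤ p.2
          have hnb : ¬ p.2 < b := fun h => hc (by simp [h, hs])
          exact le_trans h1 (not_lt.mp hnb)
        · exact h3 p hp hs

theorem scanPos_spec (s : List Char) (b : Nat) :
    scanPos s b ≤ b ∧
    (scanPos s b = b ∨ ∃ p ∈ kwRank, Hits s p ∧ scanPos s b = p.2) ∧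
    (∀ p ∈ kwRank, Hits s p → scanPos s b ≤ p.2) := by
  induction s generalizing b with
  | nil =>
    refine ⟨le_refl _, Or.inl rfl, ?_⟩
    intro p _ ⟨t, ht, hne, _⟩
    cases List.suffix_nil.mp ht
    exact absurd rfl hne
  | cons c rest ih =>
    rcases ih (kwStep (c :: rest) b) with ⟨h1, h2, h3⟩
    rcases kwStep_spec (c :: rest) b with ⟨k1, k2, k3⟩
    refine ⟨le_trans h1 k1, ?_, ?_⟩
    · -- result is b, or some hit on c::rest determined it
      rcases h2 with h2 | ⟨p, hp, ⟨t, ht, hne, hs⟩, he⟩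
      · rw [show scanPos (c :: rest) b = scanPos rest (kwStep (c :: rest) b) from rfl, h2]
        rcases k2 with k2 | ⟨p, hp, hs, he⟩
        · exact Or.inl k2
        · exact Or.inr ⟨p, hp, ⟨c :: rest, List.suffix_refl _, by simp, hs⟩, he⟩
      · exact Or.inr ⟨p, hp, ⟨t, ht.trans (List.suffix_cons c rest), hne, hs⟩,
          by rw [show scanPos (c :: rest) b = scanPos rest (kwStep (c :: rest) b) from rfl]; exact he⟩
    · intro p hp ⟨t, ht, hne, hs⟩
      rw [show scanPos (c :: rest) b = scanPos rest (kwStep (c :: rest) b) from rfl]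
      rcases List.suffix_cons_iff.mp ht with rfl | ht'
      · exact le_trans h1 (k3 p hp hs)
      · exact h3 p hp ⟨t, ht', hne, hs⟩

theorem hits_iff_isIn (s kw : List Char) (r : Nat) (h : kw ≠ []) :
    Hits s (kw, r) ↔ PySem.Chars.isIn kw s = true := by
  constructor
  · rintro ⟨t, ht, _, hs⟩
    rw [PySem.Chars.isIn_iff_infix _ _, List.infix_iff_prefix_suffix]
    exact ⟨t, (PySem.Chars.startswith_iff _ _).mp hs, ht⟩
  · intro hin
    rcases List.infix_iff_prefix_suffix.mp ((PySem.Chars.isIn_iff_infix _ _).mp hin) with ⟨t, hpre, hsuf⟩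
    refine ⟨t, hsuf, ?_, (PySem.Chars.startswith_iff _ _).mpr hpre⟩
    intro hnil; subst hnil
    exact h (List.prefix_nil.mp hpre)

-- Str.isIn on the lowered name, as Chars.isIn on its char list
theorem strIsIn_eq (w s : String) :
    PySem.Str.isIn w s = PySem.Chars.isIn w.toList s.toList := by
  simp [PySem.Str.isIn]

-- the four group conditions of A, on char lists (right-associated like List.any unfolds)
def g0 (s : List Char) : Bool :=
  PySem.Chars.isIn "cultivation".toList s || (PySem.Chars.isIn "cultivator".toList s ||
  (PySem.Chars.isIn "grow".toList s || PySem.Chars.isIn "farm".toList s))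
def g1 (s : List Char) : Bool :=
  PySem.Chars.isIn "processing".toList s || (PySem.Chars.isIn "processor".toList s ||
  (PySem.Chars.isIn "extraction".toList s || PySem.Chars.isIn "manufacturing".toList s))
def g2 (s : List Char) : Bool :=
  PySem.Chars.isIn "distribution".toList s || (PySem.Chars.isIn "distributor".toList s ||
  (PySem.Chars.isIn "transport".toList s || PySem.Chars.isIn "delivery".toList s))
def g3 (s : List Char) : Bool :=
  PySem.Chars.isIn "testing".toList s || (PySem.Chars.isIn "lab".toList s ||
  PySem.Chars.isIn "laboratory".toList s)

theorem hit_group (s : List Char) (p : List Char × Nat) (hp : p ∈ kwRank) (hh : Hits s p) :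
    (p.2 = 0 ∧ g0 s = true) ∨ (p.2 = 1 ∧ g1 s = true) ∨
    (p.2 = 2 ∧ g2 s = true) ∨ (p.2 = 3 ∧ g3 s = true) := by
  fin_cases hp <;>
    (rw [hits_iff_isIn _ _ _ (by decide)] at hh; simp [g0, g1, g2, g3] at hh ⊢; tauto)

theorem scan_le_of_isIn (s : List Char) (b : Nat) (kw : List Char) (r : Nat)
    (hp : (kw, r) ∈ kwRank) (hne : kw ≠ []) (h : PySem.Chars.isIn kw s = true) :
    scanPos s b ≤ r :=
  (scanPos_spec s b).2.2 (kw, r) hp ((hits_iff_isIn s kw r hne).mpr h)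

theorem scan_eq (s : List Char) :
    scanPos s 4 = if g0 s then 0 else if g1 s then 1 else if g2 s then 2
                  else if g3 s then 3 else 4 := by
  obtain ⟨hle, hc, hmin⟩ := scanPos_spec s 4
  have hval : ∀ k, scanPos s 4 = k → k ≠ 4 →
      (k = 0 ∧ g0 s = true) ∨ (k = 1 ∧ g1 s = true) ∨
      (k = 2 ∧ g2 s = true) ∨ (k = 3 ∧ g3 s = true) := by
    intro k hk hk4
    rcases hc with hc | ⟨p, hp, hh, he⟩
    · exact absurd (hk.symm.trans hc) hk4
    · have hg := hit_group s p hp hh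
      have hpk : p.2 = k := he.symm.trans hk
      exact hpk ▸ hg
  split_ifs with h0 h1 h2 h3
  · -- g0: some rank-0 keyword occurs, so the minimum is ≤ 0
    have hb : scanPos s 4 ≤ 0 := by
      simp only [g0, Bool.or_eq_true] at h0
      rcases h0 with h | h | h | h <;>
        exact scan_le_of_isIn s 4 _ 0 (by simp [kwRank]) (by decide) h
    omega
  · -- ¬g0, g1: minimum ≤ 1 and cannot be 0
    have hb : scanPos s 4 ≤ 1 := by
      simp only [g1, Bool.or_eq_true] at h1
      rcases h1 with h | h | h | h <;>
        exact scan_le_of_isIn s 4 _ 1 (by simp [kwRank]) (by decide) h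
    by_contra hne
    rcases hval (scanPos s 4) rfl (by omega) with ⟨hk, hg⟩ | ⟨hk, hg⟩ | ⟨hk, hg⟩ | ⟨hk, hg⟩
    · exact h0 hg
    · omega
    · omega
    · omega
  · -- ¬g0 ¬g1, g2: minimum ≤ 2 and cannot be 0 or 1
    have hb : scanPos s 4 ≤ 2 := by
      simp only [g2, Bool.or_eq_true] at h2
      rcases h2 with h | h | h | h <;>
        exact scan_le_of_isIn s 4 _ 2 (by simp [kwRank]) (by decide) h
    by_contra hne
    rcases hval (scanPos s 4) rfl (by omega) with ⟨hk, hg⟩ | ⟨hk, hg⟩ | ⟨hk, hg⟩ | ⟨hk, hg⟩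
    · exact h0 hg
    · exact h1 hg
    · omega
    · omega
  · -- ¬g0 ¬g1 ¬g2, g3: minimum ≤ 3 and cannot be 0, 1 or 2
    have hb : scanPos s 4 ≤ 3 := by
      simp only [g3, Bool.or_eq_true] at h3
      rcases h3 with h | h | h <;>
        exact scan_le_of_isIn s 4 _ 3 (by simp [kwRank]) (by decide) h
    by_contra hne
    rcases hval (scanPos s 4) rfl (by omega) with ⟨hk, hg⟩ | ⟨hk, hg⟩ | ⟨hk, hg⟩ | ⟨hk, hg⟩
    · exact h0 hg
    · exact h1 hg
    · exact h2 hg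
    · omega
  · -- nothing occurs: the accumulator stays 4
    by_contra hne
    rcases hval (scanPos s 4) rfl hne with ⟨hk, hg⟩ | ⟨hk, hg⟩ | ⟨hk, hg⟩ | ⟨hk, hg⟩
    · exact h0 hg
    · exact h1 hg
    · exact h2 hg
    · exact h3 hg

-- ===== VERDICT (by name: the statement is the Claim_ definition above) =====
theorem determine_license_type_spec : Claim_equal_determine_license_type := by
  intro premises_name _
  unfold Spec_determine_license_type determine_license_type determine_license_type_alt
  by_cases hemp : premises_name == ""
  · simp [hemp]
  · rw [if_neg hemp, if_neg hemp, scan_eq]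
    simp only [List.any_cons, List.any_nil, Bool.or_false, strIsIn_eq]
    rw [show ∀ t, (PySem.Chars.isIn "cultivation".toList t || (PySem.Chars.isIn "cultivator".toList t || (PySem.Chars.isIn "grow".toList t || PySem.Chars.isIn "farm".toList t))) = g0 t from fun _ => rfl,
        show ∀ t, (PySem.Chars.isIn "processing".toList t || (PySem.Chars.isIn "processor".toList t || (PySem.Chars.isIn "extraction".toList t || PySem.Chars.isIn "manufacturing".toList t))) = g1 t from fun _ => rfl,
        show ∀ t, (PySem.Chars.isIn "distribution".toList t || (PySem.Chars.isIn "distributor".toList t || (PySem.Chars.isIn "transport".toList t || PySem.Chars.isIn "delivery".toList t))) = g2 t from fun _ => rfl,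
        show ∀ t, (PySem.Chars.isIn "testing".toList t || (PySem.Chars.isIn "lab".toList t || PySem.Chars.isIn "laboratory".toList t)) = g3 t from fun _ => rfl]
    by_cases h0 : g0 (PySem.Chars.lower premises_name.toList) <;>
      by_cases h1 : g1 (PySem.Chars.lower premises_name.toList) <;>
        by_cases h2 : g2 (PySem.Chars.lower premises_name.toList) <;>
          by_cases h3 : g3 (PySem.Chars.lower premises_name.toList) <;>
            simp [h0, h1, h2, h3, pvLabels]
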